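-- pv_equiv track=rewrite | github.com/Unexp1ainable/BRIa | script.py | transform
-- ===== SOURCE A (Python) =====
-- def transform(data):
--     results = []
--     lastOne = None
--     lastEnd = -100
--     MIN_GAP = 100
--     MIN_WIDTH = 0
--
--     for i, dato in enumerate(data):
--         if dato == 1 and lastOne == None:
--             lastOne = i
--
--         elif dato == 0 and lastOne != None:
--             if i-lastEnd < MIN_GAP:
--                 tmp = results[-1]
--                 results.pop()
--                 results.append((tmp[0], i))
--             else:
--                 results.append((i, lastOne))
--
--             lastOne = None
--             lastEnd = i
--
--     return results
-- ===== SOURCE B (Python) =====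
-- def transform(data):
--     # pass 1: search-based run detection — find next 1, then next 0 after it
--     runs = []
--     pos = 0
--     while True:
--         try:
--             s = data.index(1, pos)
--             e = data.index(0, s + 1)
--         except ValueError:
--             break
--         runs.append((s, e))
--         pos = e + 1
--     # pass 2: merge runs whose end is closer than 100 to the previous end
--     out = []
--     lastEnd = -100
--     for s, e in runs:
--         if e - lastEnd < 100:
--             out[-1] = (out[-1][0], e)
--         else:
--             out.append((e, s))
--         lastEnd = e
--     return out
-- ===== Notes on version B (the rewrite author's own statement) =====
-- stated objective: alternative
-- what changed: Replaced A's single per-element state machine by two passes: a search-based run detector (find the next 1, then the next 0 after it, skipping ahead) followed by a separate merge fold over the detected (start,end) runs.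
import Mathlib
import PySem

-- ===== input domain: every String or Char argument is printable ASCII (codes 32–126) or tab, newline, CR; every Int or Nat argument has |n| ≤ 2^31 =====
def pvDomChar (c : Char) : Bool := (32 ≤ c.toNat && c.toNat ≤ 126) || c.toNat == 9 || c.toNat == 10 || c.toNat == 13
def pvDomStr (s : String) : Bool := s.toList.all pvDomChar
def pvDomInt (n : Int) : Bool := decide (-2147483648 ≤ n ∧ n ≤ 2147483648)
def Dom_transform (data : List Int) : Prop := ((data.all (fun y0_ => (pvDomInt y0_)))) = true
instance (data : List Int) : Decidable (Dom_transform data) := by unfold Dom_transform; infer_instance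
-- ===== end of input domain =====

-- B replaces A's per-element state machine by a search-based run detector plus a
-- separate merge fold over the detected runs (objective: alternative decomposition).

-- ===== PORT A =====
-- A's single loop over enumerate(data) with state (results, lastOne, lastEnd).
-- results[-1] in the merge branch is only reached with results nonempty (the first
-- close has i - (-100) ≥ 100), so its IndexError is unreachable; .getD (0,0) is a
-- placeholder for that unreachable case.
def transformLoop (xs : List Int) (i : Int) (results : List (Int × Int))
    (lastOne : Option Int) (lastEnd : Int) : List (Int × Int) :=
  match xs with
  | [] => results
  | d :: rest =>
    if d = 1 ∧ lastOne = none then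
      transformLoop rest (i + 1) results (some i) lastEnd
    else if d = 0 ∧ lastOne ≠ none then
      let results' :=
        if i - lastEnd < 100 then
          let tmp := (PySem.List.pyGet? results (-1)).getD (0, 0)
          results.dropLast ++ [(tmp.1, i)]
        else
          results ++ [(i, lastOne.getD 0)]
      transformLoop rest (i + 1) results' none i
    else
      transformLoop rest (i + 1) results lastOne lastEnd

def transform (data : List Int) : List (Int × Int) :=
  transformLoop data 0 [] none (-100)

-- ===== PORT B =====
-- pass 1 of Source B: data.index(1, pos) then data.index(0, s+1); ported as findIdx?
-- on the suffix (data.index(v, p) = p + first index of v in the suffix from p),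
-- skipping directly past each detected run.
def runsFrom (xs : List Int) (i : Int) : List (Int × Int) :=
  match _h1 : List.findIdx? (· == 1) xs with
  | none => []
  | some k =>
    match List.findIdx? (· == 0) (xs.drop (k + 1)) with
    | none => []
    | some m =>
      (i + (k : Int), i + (k : Int) + 1 + (m : Int)) ::
        runsFrom ((xs.drop (k + 1)).drop (m + 1)) (i + (k : Int) + 1 + (m : Int) + 1)
termination_by xs.length
decreasing_by
  have hk := (List.findIdx?_eq_some_iff_findIdx_eq.mp _h1).1
  simp only [List.length_drop]
  omega

-- pass 2 of Source B: fold over the runs with (out, lastEnd); out[-1] is unreachable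
-- on empty out (same reason as in A's port), .getD (0,0) is its placeholder.
def mergeLoop (runs : List (Int × Int)) (out : List (Int × Int)) (lastEnd : Int) :
    List (Int × Int) :=
  match runs with
  | [] => out
  | (s, e) :: rest =>
    let out' :=
      if e - lastEnd < 100 then
        let tmp := (PySem.List.pyGet? out (-1)).getD (0, 0)
        out.dropLast ++ [(tmp.1, e)]
      else
        out ++ [(e, s)]
    mergeLoop rest out' e

def transform_alt (data : List Int) : List (Int × Int) :=
  mergeLoop (runsFrom data 0) [] (-100)

-- ===== PRECONDITION & SPEC =====
def Spec_transform (data : List Int) (out : List (Int × Int)) : Prop := out = transform_alt data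
instance (data : List Int) (out : List (Int × Int)) : Decidable (Spec_transform data out) := by unfold Spec_transform; infer_instance

-- ===== CLAIM (what is proved, stated in full; the proofs are below) =====
def Claim_equal_transform : Prop := ∀ (data : List Int), Dom_transform data → Spec_transform data (transform data)

-- ===== LEMMAS AND PROOFS =====

-- runsFrom with an open run pending at start s (A's 'lastOne = some s' state).
def openRuns (xs : List Int) (i s : Int) : List (Int × Int) :=
  match List.findIdx? (· == 0) xs with
  | none => []
  | some m => (s, i + (m : Int)) :: runsFrom (xs.drop (m + 1)) (i + (m : Int) + 1)

-- plain unfolding equation for runsFrom (the definition matches with a named hypothesis)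
theorem runsFrom_eq (xs : List Int) (i : Int) :
    runsFrom xs i =
      match List.findIdx? (· == 1) xs with
      | none => []
      | some k =>
        match List.findIdx? (· == 0) (xs.drop (k + 1)) with
        | none => []
        | some m =>
          (i + (k : Int), i + (k : Int) + 1 + (m : Int)) ::
            runsFrom ((xs.drop (k + 1)).drop (m + 1)) (i + (k : Int) + 1 + (m : Int) + 1) := by
  rw [runsFrom]
  rcases h : List.findIdx? (· == 1) xs with _ | k
  · rfl
  · rfl

theorem runsFrom_cons_one (rest : List Int) (i : Int) :
    runsFrom (1 :: rest) i = openRuns rest (i + 1) i := by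
  rw [runsFrom_eq, openRuns]
  have h1 : List.findIdx? (· == 1) ((1 : Int) :: rest) = some 0 := by
    simp [List.findIdx?_cons]
  rw [h1]
  simp only [List.drop_succ_cons, List.drop_zero]
  rcases h : List.findIdx? (· == 0) rest with _ | m
  · rfl
  · norm_num

theorem runsFrom_cons_ne (x : Int) (rest : List Int) (i : Int) (hx : x ≠ 1) :
    runsFrom (x :: rest) i = runsFrom rest (i + 1) := by
  rw [runsFrom_eq, runsFrom_eq]
  have hb : (x == 1) = false := by simp [hx]
  simp only [List.findIdx?_cons, hb, Bool.false_eq_true, if_false]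
  rcases h : List.findIdx? (· == 1) rest with _ | k
  · rfl
  · simp only [Option.map_some]
    have hd : (x :: rest).drop (k + 1 + 1) = rest.drop (k + 1) := by
      simp [List.drop_succ_cons]
    rw [hd]
    rcases List.findIdx? (· == 0) (rest.drop (k + 1)) with _ | m
    · rfl
    · push_cast
      ring_nf

theorem openRuns_cons_zero (rest : List Int) (i s : Int) :
    openRuns (0 :: rest) i s = (s, i) :: runsFrom rest (i + 1) := by
  rw [openRuns]
  have h0 : List.findIdx? (· == 0) ((0 : Int) :: rest) = some 0 := by
    simp [List.findIdx?_cons]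
  rw [h0]
  simp

theorem openRuns_cons_ne (x : Int) (rest : List Int) (i s : Int) (hx : x ≠ 0) :
    openRuns (x :: rest) i s = openRuns rest (i + 1) s := by
  rw [openRuns, openRuns]
  have hb : (x == 0) = false := by simp [hx]
  simp only [List.findIdx?_cons, hb, Bool.false_eq_true, if_false]
  rcases List.findIdx? (· == 0) rest with _ | m
  · rfl
  · simp only [Option.map_some, List.drop_succ_cons]
    push_cast
    ring_nf

-- Main invariant: A's loop, in either pending-state, computes the merge fold of
-- the remaining runs that B's detector finds in the rest of the data.
theorem loop_eq (xs : List Int) : ∀ (i : Int) (res : List (Int × Int)) (lE : Int),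
    (transformLoop xs i res none lE = mergeLoop (runsFrom xs i) res lE) ∧
    (∀ s, transformLoop xs i res (some s) lE = mergeLoop (openRuns xs i s) res lE) := by
  induction xs with
  | nil =>
    intro i res lE
    constructor
    · rw [transformLoop, runsFrom]; simp [mergeLoop]
    · intro s; rw [transformLoop, openRuns]; simp [mergeLoop]
  | cons x rest ih =>
    intro i res lE
    constructor
    · by_cases hx : x = 1
      · subst hx
        rw [transformLoop]
        rw [if_pos (⟨rfl, rfl⟩ : (1:Int) = 1 ∧ (none : Option Int) = none)]
        rw [runsFrom_cons_one]
        exact (ih (i + 1) res lE).2 i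
      · rw [transformLoop]
        rw [if_neg (by simp [hx]), if_neg (by simp)]
        rw [runsFrom_cons_ne x rest i hx]
        exact (ih (i + 1) res lE).1
    · intro s
      by_cases hx : x = 0
      · subst hx
        rw [transformLoop]
        rw [if_neg (by simp), if_pos (by simp)]
        rw [openRuns_cons_zero, mergeLoop]
        exact (ih (i + 1) _ i).1
      · rw [transformLoop]
        rw [if_neg (by simp), if_neg (by simp [hx])]
        rw [openRuns_cons_ne x rest i s hx]
        exact (ih (i + 1) res lE).2 s

-- ===== VERDICT (by name: the statement is the Claim_ definition above) =====
theorem transform_spec : Claim_equal_transform := by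
  intro data _
  unfold Spec_transform transform transform_alt
  exact (loop_eq data 0 [] (-100)).1
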